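-- pv_equiv track=rewrite | github.com/JoeBenczarski/ECE554 | RaspberryPi/Source/v2/light_services.py | _get_rgb_list
-- ===== SOURCE A (Python) =====
-- def _get_rgb_list(size=32, leds=1, colors=[(255,255,255)]):
--     rgb_list = []
--     count = 0
--     while count < size:
--         for color in colors:
--             for i in range(leds):
--                 if count >= size:
--                     break
--                 rgb_list.append(color)
--                 count += 1
--     return rgb_list
-- ===== SOURCE B (Python) =====
-- def _get_rgb_list(size=32, leds=1, colors=[(255,255,255)]):
--     reps = min(leds, size)  # never need more than size copies of one color
--     block = []
--     for color in colors:
--         if len(block) >= size:  # one cycle never contributes more than size elements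
--             break
--         block.extend([color] * reps)
--     result = []
--     while len(result) < size:
--         result.extend(block)
--     return result[:size]
-- ===== Notes on version B (the rewrite author's own statement) =====
-- stated objective: simpler
-- what changed: B precomputes the one-cycle block (each color repeated min(leds, size) times, since no color is ever needed more than size times) and tiles it with extend until the list is long enough, then slices to size, replacing A's nested while/for/for with a per-element counter and mid-block break.
import Mathlib
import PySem

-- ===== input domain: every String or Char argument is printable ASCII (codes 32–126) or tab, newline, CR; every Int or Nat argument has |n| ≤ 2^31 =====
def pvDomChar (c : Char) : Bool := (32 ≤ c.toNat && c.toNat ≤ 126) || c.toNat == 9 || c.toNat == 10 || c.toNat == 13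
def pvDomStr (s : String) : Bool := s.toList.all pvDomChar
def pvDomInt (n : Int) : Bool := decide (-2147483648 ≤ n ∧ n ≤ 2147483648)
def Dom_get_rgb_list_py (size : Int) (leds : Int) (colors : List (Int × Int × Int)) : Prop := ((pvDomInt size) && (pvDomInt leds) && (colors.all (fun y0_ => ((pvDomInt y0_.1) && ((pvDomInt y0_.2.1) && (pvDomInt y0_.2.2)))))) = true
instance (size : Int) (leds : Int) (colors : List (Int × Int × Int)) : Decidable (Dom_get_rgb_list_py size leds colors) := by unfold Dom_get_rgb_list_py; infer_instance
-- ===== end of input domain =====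

-- B tiles a precomputed per-cycle block and slices to size, instead of A's nested while/for/for
-- with a per-element counter and mid-block break (objective: simpler).

-- ===== PORT A =====
-- inner 'for i in range(leds)' with the 'if count >= size: break' guard; break = stop this loop.
-- Python's range(leds) is LAZY, so the loop is ported as a recursion on the remaining iteration
-- count leds.toNat (= len(range(leds))), checking the break condition first exactly as Python does.
def pvInnerA (size : Int) (color : Int × Int × Int) :
    Nat → List (Int × Int × Int) × Int → List (Int × Int × Int) × Int
  | 0, st => st
  | k + 1, (l, c) =>
    if size ≤ c then (l, c)
    else pvInnerA size color k (l ++ [color], c + 1)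

-- one iteration of the outer 'while' body: 'for color in colors: for i in range(leds): …'
def pvPassA (size leds : Int) (colors : List (Int × Int × Int))
    (st : List (Int × Int × Int) × Int) : List (Int × Int × Int) × Int :=
  colors.foldl (fun st color => pvInnerA size color leds.toNat st) st

-- the 'while count < size' loop; fuel size.toNat + 1 suffices on every input where Python terminates
def pvWhileA (size leds : Int) (colors : List (Int × Int × Int)) :
    Nat → List (Int × Int × Int) × Int → List (Int × Int × Int)
  | 0, (l, _) => l
  | f + 1, (l, c) =>
    if c < size then pvWhileA size leds colors f (pvPassA size leds colors (l, c)) else l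

def get_rgb_list_py (size : Int) (leds : Int) (colors : List (Int × Int × Int)) :
    List (Int × Int × Int) :=
  pvWhileA size leds colors (size.toNat + 1) ([], 0)

-- ===== PORT B =====
-- 'for color in colors: if len(block) >= size: break; block.extend([color] * reps)'
def pvBlockLoop (size reps : Int) :
    List (Int × Int × Int) → List (Int × Int × Int) → List (Int × Int × Int)
  | [], b => b
  | c :: rest, b =>
    if size ≤ (b.length : Int) then b
    else pvBlockLoop size reps rest (b ++ List.replicate reps.toNat c)

-- 'while len(result) < size: result.extend(block)'; fuel size.toNat + 1 suffices wherever Python terminates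
def pvWhileB (size : Int) (block : List (Int × Int × Int)) :
    Nat → List (Int × Int × Int) → List (Int × Int × Int)
  | 0, r => r
  | f + 1, r =>
    if (r.length : Int) < size then pvWhileB size block f (r ++ block) else r

def get_rgb_list_py_alt (size : Int) (leds : Int) (colors : List (Int × Int × Int)) :
    List (Int × Int × Int) :=
  PySem.List.slice (pvWhileB size (pvBlockLoop size (min leds size) colors []) (size.toNat + 1) []) none (some size)

-- ===== PRECONDITION & SPEC =====
-- Pre_ excludes exactly the inputs on which Python A never returns (infinite loop): size > 0 with
-- an empty repetition block (leds ≤ 0 or colors == []). B diverges there too.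
def Pre_get_rgb_list_py (size : Int) (leds : Int) (colors : List (Int × Int × Int)) : Prop :=
  size ≤ 0 ∨ (1 ≤ leds ∧ colors ≠ [])
instance (size : Int) (leds : Int) (colors : List (Int × Int × Int)) : Decidable (Pre_get_rgb_list_py size leds colors) := by unfold Pre_get_rgb_list_py; infer_instance

def pvWitness_get_rgb_list_py : Int × Int × (List (Int × Int × Int)) := (5, 2, [(255, 255, 255)])

def Spec_get_rgb_list_py (size : Int) (leds : Int) (colors : List (Int × Int × Int)) (out : List (Int × Int × Int)) : Prop := out = get_rgb_list_py_alt size leds colors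
instance (size : Int) (leds : Int) (colors : List (Int × Int × Int)) (out : List (Int × Int × Int)) : Decidable (Spec_get_rgb_list_py size leds colors out) := by unfold Spec_get_rgb_list_py; infer_instance

-- ===== CLAIM (what is proved, stated in full; the proofs are below) =====
def Claim_equal_get_rgb_list_py : Prop := ∀ (size : Int) (leds : Int) (colors : List (Int × Int × Int)), Dom_get_rgb_list_py size leds colors → Pre_get_rgb_list_py size leds colors → Spec_get_rgb_list_py size leds colors (get_rgb_list_py size leds colors)

-- ===== LEMMAS AND PROOFS =====

-- pvBlock r = one full cycle with r reps per color (reference value used by the proofs)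
def pvBlock (r : Int) (colors : List (Int × Int × Int)) : List (Int × Int × Int) :=
  colors.flatMap (fun c => List.replicate r.toNat c)

-- reference shape: the first n elements of block repeated forever
def pvCyc (block : List (Int × Int × Int)) : Nat → List (Int × Int × Int)
  | 0 => []
  | n + 1 =>
    if _h : block.length = 0 then []
    else block.take (n + 1) ++ pvCyc block (n + 1 - block.length)
  decreasing_by omega

lemma pvInnerA_eq (size : Int) (color : Int × Int × Int) (k : Nat) (l : List (Int × Int × Int)) (c : Int) :
    pvInnerA size color k (l, c) =
      (l ++ List.replicate (min k (size - c).toNat) color,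
       c + (min k (size - c).toNat : Nat)) := by
  induction k generalizing l c with
  | zero => simp [pvInnerA]
  | succ k ih =>
    by_cases h : size ≤ c
    · have h0 : (size - c).toNat = 0 := by omega
      simp [pvInnerA, h, h0]
    · rw [pvInnerA, if_neg h, ih]
      have h1 : 1 ≤ (size - c).toNat := by omega
      have h2 : (size - (c + 1)).toNat = (size - c).toNat - 1 := by omega
      have h3 : min k ((size - c).toNat - 1) + 1 = min (k + 1) (size - c).toNat := by omega
      simp only [Prod.mk.injEq]
      refine ⟨?_, ?_⟩
      · rw [h2, List.append_assoc, List.singleton_append, ← List.replicate_succ, h3]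
      · rw [h2, ← h3]
        push_cast
        ring

lemma pvPassA_eq (size leds : Int) (colors : List (Int × Int × Int)) (l : List (Int × Int × Int)) (c : Int) :
    pvPassA size leds colors (l, c) =
      (l ++ (pvBlock leds colors).take (size - c).toNat,
       c + (min (pvBlock leds colors).length (size - c).toNat : Nat)) := by
  induction colors generalizing l c with
  | nil => simp [pvPassA, pvBlock]
  | cons col rest ih =>
    rw [pvPassA, List.foldl_cons, pvInnerA_eq]
    rw [show ∀ st, rest.foldl (fun st color => pvInnerA size color leds.toNat st) st = pvPassA size leds rest st from fun _ => rfl]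
    rw [ih]
    have hblock : pvBlock leds (col :: rest) = List.replicate leds.toNat col ++ pvBlock leds rest := by
      simp [pvBlock]
    have hrest : (size - (c + ((min leds.toNat (size - c).toNat : Nat) : Int))).toNat
        = (size - c).toNat - min leds.toNat (size - c).toNat := by omega
    simp only [Prod.mk.injEq]
    refine ⟨?_, ?_⟩
    · rw [hrest, hblock, List.take_append, List.take_replicate, List.length_replicate,
        List.append_assoc]
      have e1 : min (size - c).toNat leds.toNat = min leds.toNat (size - c).toNat := Nat.min_comm _ _
      have e2 : (size - c).toNat - leds.toNat
          = (size - c).toNat - min leds.toNat (size - c).toNat := by omega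
      rw [e1, e2]
    · rw [hrest, hblock, List.length_append, List.length_replicate]
      have e3 : min leds.toNat (size - c).toNat
            + min (pvBlock leds rest).length ((size - c).toNat - min leds.toNat (size - c).toNat)
          = min (leds.toNat + (pvBlock leds rest).length) (size - c).toNat := by omega
      rw [← e3]
      push_cast
      ring

lemma pvWhileA_eq (size leds : Int) (colors : List (Int × Int × Int))
    (hb : 1 ≤ (pvBlock leds colors).length) :
    ∀ (fuel : Nat) (l : List (Int × Int × Int)) (c : Int), (size - c).toNat ≤ fuel →
      pvWhileA size leds colors fuel (l, c) = l ++ pvCyc (pvBlock leds colors) (size - c).toNat := by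
  intro fuel
  induction fuel with
  | zero =>
    intro l c hf
    have h0 : (size - c).toNat = 0 := by omega
    rw [h0]
    simp [pvWhileA, pvCyc]
  | succ f ih =>
    intro l c hf
    by_cases h : c < size
    · rw [pvWhileA, if_pos h, pvPassA_eq, ih]
      · set T := (pvBlock leds colors).length with hT
        set r := (size - c).toNat with hr
        have hr1 : 1 ≤ r := by omega
        have hrest : (size - (c + ((min T r : Nat) : Int))).toNat = r - T := by omega
        rw [hrest]
        obtain ⟨k, hk⟩ : ∃ k, r = k + 1 := ⟨r - 1, by omega⟩
        rw [List.append_assoc]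
        congr 1
        rw [hk, pvCyc, dif_neg (by omega : ¬ (pvBlock leds colors).length = 0), ← hk]
      · have : (size - (c + ((min (pvBlock leds colors).length (size - c).toNat : Nat) : Int))).toNat
            = (size - c).toNat - (pvBlock leds colors).length := by omega
        omega
    · have h0 : (size - c).toNat = 0 := by omega
      rw [pvWhileA, if_neg h, h0]
      simp [pvCyc]

lemma pvWhileB_take (n : Nat) (block : List (Int × Int × Int)) (hb : 1 ≤ block.length) :
    ∀ (fuel : Nat) (l : List (Int × Int × Int)), n - l.length ≤ fuel →
      List.take n (pvWhileB (n : Int) block fuel l) = List.take n l ++ pvCyc block (n - l.length) := by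
  intro fuel
  induction fuel with
  | zero =>
    intro l hf
    have h0 : n - l.length = 0 := by omega
    rw [h0]
    simp [pvWhileB, pvCyc]
  | succ f ih =>
    intro l hf
    by_cases h : l.length < n
    · rw [pvWhileB, if_pos (by exact_mod_cast h),
        ih (l ++ block) (by rw [List.length_append]; omega)]
      have htl : List.take n l = l := List.take_of_length_le (by omega)
      rw [List.take_append, htl, List.length_append, List.append_assoc]
      congr 1
      obtain ⟨k, hk⟩ : ∃ k, n - l.length = k + 1 := ⟨n - l.length - 1, by omega⟩
      rw [hk, pvCyc, dif_neg (by omega : ¬ block.length = 0), ← hk]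
      congr 2
      omega
    · have h0 : n - l.length = 0 := by omega
      rw [pvWhileB, if_neg (by exact_mod_cast h), h0]
      simp [pvCyc]

lemma pvBlock_len (r : Int) (colors : List (Int × Int × Int))
    (hr : 1 ≤ r) (hc : colors ≠ []) : 1 ≤ (pvBlock r colors).length := by
  obtain ⟨col, rest, rfl⟩ := List.exists_cons_of_ne_nil hc
  simp [pvBlock]
  omega

lemma pvBlock_cons (r : Int) (col : Int × Int × Int) (rest : List (Int × Int × Int)) :
    pvBlock r (col :: rest) = List.replicate r.toNat col ++ pvBlock r rest := by
  simp [pvBlock]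

lemma pvBlock_take_head (r : Int) (n : Nat) (col : Int × Int × Int) (rest : List (Int × Int × Int))
    (h : n ≤ r.toNat) :
    List.take n (pvBlock r (col :: rest)) = List.replicate n col := by
  rw [pvBlock_cons, List.take_append, List.take_replicate, List.length_replicate,
    Nat.min_eq_left h, Nat.sub_eq_zero_of_le h, List.take_zero, List.append_nil]

lemma pvCyc_eq_take (block : List (Int × Int × Int)) (n : Nat) (h1 : 1 ≤ n) (h2 : n ≤ block.length) :
    pvCyc block n = List.take n block := by
  obtain ⟨k, hk⟩ : ∃ k, n = k + 1 := ⟨n - 1, by omega⟩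
  subst hk
  rw [pvCyc, dif_neg (by omega : ¬ block.length = 0), Nat.sub_eq_zero_of_le h2]
  simp [pvCyc]

-- the capped block min(leds, size) tiles to the same first size elements as the full block
lemma pvCyc_min (size leds : Int) (colors : List (Int × Int × Int))
    (hleds : 1 ≤ leds) (hc : colors ≠ []) (hs : 0 < size) :
    pvCyc (pvBlock (min leds size) colors) size.toNat = pvCyc (pvBlock leds colors) size.toNat := by
  by_cases hls : leds ≤ size
  · rw [min_eq_left hls]
  · have hm : min leds size = size := min_eq_right (by omega)
    rw [hm]
    obtain ⟨col, rest, rfl⟩ := List.exists_cons_of_ne_nil hc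
    have h1 : size.toNat ≤ (pvBlock size (col :: rest)).length := by
      rw [pvBlock_cons, List.length_append, List.length_replicate]; omega
    have h2 : size.toNat ≤ (pvBlock leds (col :: rest)).length := by
      rw [pvBlock_cons, List.length_append, List.length_replicate]; omega
    rw [pvCyc_eq_take _ _ (by omega) h1, pvCyc_eq_take _ _ (by omega) h2,
      pvBlock_take_head _ _ _ _ (by omega), pvBlock_take_head _ _ _ _ (by omega)]

-- the block builder returns either the full cycle or a prefix of it that is already ≥ size long
lemma pvBlockLoop_spec (size r : Int) (colors : List (Int × Int × Int)) (acc : List (Int × Int × Int)) :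
    pvBlockLoop size r colors acc <+: acc ++ pvBlock r colors ∧
    (pvBlockLoop size r colors acc = acc ++ pvBlock r colors ∨
      size ≤ ((pvBlockLoop size r colors acc).length : Int)) := by
  induction colors generalizing acc with
  | nil =>
    simp [pvBlockLoop, pvBlock]
  | cons c rest ih =>
    rw [pvBlockLoop]
    by_cases h : size ≤ (acc.length : Int)
    · rw [if_pos h]
      exact ⟨List.prefix_append acc _, Or.inr h⟩
    · rw [if_neg h]
      obtain ⟨h1, h2⟩ := ih (acc ++ List.replicate r.toNat c)
      have hb : (acc ++ List.replicate r.toNat c) ++ pvBlock r rest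
          = acc ++ pvBlock r (c :: rest) := by
        rw [pvBlock_cons, List.append_assoc]
      refine ⟨hb ▸ h1, ?_⟩
      rcases h2 with h2 | h2
      · exact Or.inl (by rw [h2, hb])
      · exact Or.inr h2

-- ===== VERDICT (by name: the statement is the Claim_ definition above) =====
theorem get_rgb_list_py_spec : Claim_equal_get_rgb_list_py := by
  intro size leds colors _ hpre
  unfold Spec_get_rgb_list_py get_rgb_list_py get_rgb_list_py_alt
  rcases hpre with hle | ⟨hleds, hc⟩
  · have h0 : size.toNat = 0 := by omega
    rw [h0]
    rw [pvWhileA, if_neg (by omega : ¬ (0 : Int) < size)]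
    rw [pvWhileB, if_neg (by simp; omega)]
    simp [PySem.List.slice]
  · have hbA := pvBlock_len leds colors hleds hc
    by_cases hs : size ≤ 0
    · have h0 : size.toNat = 0 := by omega
      rw [h0]
      rw [pvWhileA, if_neg (by omega : ¬ (0 : Int) < size)]
      rw [pvWhileB, if_neg (by simp; omega)]
      simp [PySem.List.slice]
    · set n := size.toNat with hn
      obtain ⟨hp, hcase⟩ := pvBlockLoop_spec size (min leds size) colors []
      rw [List.nil_append] at hp hcase
      have hbB : 1 ≤ (pvBlockLoop size (min leds size) colors []).length := by
        rcases hcase with h | h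
        · rw [h]; exact pvBlock_len (min leds size) colors (by omega) hc
        · omega
      have hkey : pvCyc (pvBlockLoop size (min leds size) colors []) n
          = pvCyc (pvBlock leds colors) n := by
        have hmin := pvCyc_min size leds colors hleds hc (by omega)
        rcases hcase with h | h
        · rw [h, ← hn] at *
          exact hmin
        · have hn1 : n ≤ (pvBlockLoop size (min leds size) colors []).length := by omega
          obtain ⟨t, ht⟩ := hp
          have hn2 : n ≤ (pvBlock (min leds size) colors).length := by
            rw [← ht, List.length_append]; omega
          rw [pvCyc_eq_take _ _ (by omega) hn1, ← hmin, hn,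
            pvCyc_eq_take _ _ (by omega) (by rw [← hn]; exact hn2)]
          rw [← ht, List.take_append, Nat.sub_eq_zero_of_le (by omega), List.take_zero,
            List.append_nil]
      have hsz : size = (n : Int) := by omega
      rw [hsz]
      rw [pvWhileA_eq (n : Int) leds colors hbA (n + 1) [] 0 (by omega)]
      rw [PySem.List.slice_to_natCast]
      rw [hsz] at hbB
      rw [pvWhileB_take n _ hbB (n + 1) [] (by simp)]
      have e : (((n : Int)) - 0).toNat = n := by omega
      rw [e]
      simp only [List.take_nil, List.nil_append, Nat.sub_zero, List.length_nil]
      rw [hsz] at hkey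
      exact hkey.symm
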